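-- pv_equiv track=rewrite | github.com/ionab10/graphs | graph_colouring.py | pairwise_and
-- ===== SOURCE A (Python) =====
-- def pairwise_and(sets):
--     temp=set()
--     duplicates=set()
--     for s in sets:
--         for x in s:
--             if x not in temp:
--                 temp.add(x)
--             else:
--                 duplicates.add(x)
--     return duplicates
-- ===== SOURCE B (Python) =====
-- def pairwise_and(sets):
--     # Phase 1: flatten into one stream and record each value's first position.
--     flat = [x for s in sets for x in s]
--     first = {}
--     for i, x in enumerate(flat):
--         first.setdefault(x, i)
--     # Phase 2: keep exactly the occurrences that are not the first of their value.
--     return {x for i, x in enumerate(flat) if first[x] < i}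
-- ===== Notes on version B (the rewrite author's own statement) =====
-- stated objective: alternative
-- what changed: Replaces A's single-pass scan that branches between a seen-set and a duplicates-set with a two-phase shape: flatten all sets into one stream and build a first-position index of it, then a separate comprehension keeps exactly the occurrences that are not the first of their value.
import Mathlib
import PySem

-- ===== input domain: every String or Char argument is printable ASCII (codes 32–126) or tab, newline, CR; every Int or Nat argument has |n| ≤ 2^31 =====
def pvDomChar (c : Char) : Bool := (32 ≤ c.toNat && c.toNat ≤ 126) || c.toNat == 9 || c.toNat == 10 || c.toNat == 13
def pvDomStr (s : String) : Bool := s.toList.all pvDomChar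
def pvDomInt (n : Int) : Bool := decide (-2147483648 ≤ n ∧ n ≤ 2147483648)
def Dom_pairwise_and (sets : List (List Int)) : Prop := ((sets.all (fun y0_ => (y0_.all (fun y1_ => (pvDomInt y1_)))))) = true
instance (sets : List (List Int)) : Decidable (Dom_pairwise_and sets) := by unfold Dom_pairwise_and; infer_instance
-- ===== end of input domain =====

-- B replaces A's branching seen/duplicates scan by a two-phase flatten + first-position-index + filter; alternative (not faster).
-- Both Pythons return a set; the Lean ports represent it as the duplicates in first-duplication order.

-- ===== PORT A =====
-- scan each element, branching between the seen-set and the duplicates-set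
def pairwise_and (sets : List (List Int)) : List Int :=
  (sets.foldl
    (fun acc s =>
      s.foldl
        (fun (acc : PySem.Set Int × PySem.Set Int) x =>
          if x ∉ acc.1 then (acc.1.add x, acc.2) else (acc.1, acc.2.add x))
        acc)
    (PySem.Set.empty, PySem.Set.empty)).2

-- ===== PORT B =====
-- phase 1: flatten and record each value's first position; phase 2: keep the non-first occurrences.
-- 'first[x]' is ported through Dict.get?: KeyError is impossible (every value of flat is a key of first),
-- so the 'none' branch of the lookup is unreachable and the .getD false is exact.
def pairwise_and_alt (sets : List (List Int)) : List Int :=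
  let flat := sets.flatMap (fun s => s)
  let first := (PySem.List.enumerate flat).foldl
      (fun (d : PySem.Dict Int Int) p => d.setdefault p.2 p.1) PySem.Dict.empty
  PySem.Set.ofList
    (((PySem.List.enumerate flat).filter
        (fun p => ((first.get? p.2).map (fun j => decide (j < p.1))).getD false)).map
      (fun p => p.2))

-- ===== PRECONDITION & SPEC =====
def Spec_pairwise_and (sets : List (List Int)) (out : List Int) : Prop := out = pairwise_and_alt sets
instance (sets : List (List Int)) (out : List Int) : Decidable (Spec_pairwise_and sets out) := by unfold Spec_pairwise_and; infer_instance

-- ===== CLAIM (what is proved, stated in full; the proofs are below) =====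
def Claim_equal_pairwise_and : Prop := ∀ (sets : List (List Int)), Dom_pairwise_and sets → Spec_pairwise_and sets (pairwise_and sets)

-- ===== LEMMAS AND PROOFS =====

-- the common skeleton: the list of duplicate OCCURRENCES of l, scanning with prefix pre already seen
def dupScan (pre l : List Int) : List Int :=
  match l with
  | [] => []
  | x :: l => if x ∈ pre then x :: dupScan (pre ++ [x]) l else dupScan (pre ++ [x]) l

-- B's setdefault loop records the first position of each value
theorem get?_setdefault_fold (l : List Int) (s : Int) (d : PySem.Dict Int Int) (x : Int) :
    ((PySem.List.enumerate l s).foldl (fun d p => d.setdefault p.2 p.1) d).get? x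
      = (d.get? x).or ((PySem.List.index? l x).map (fun k => s + (k : Int))) := by
  induction l generalizing s d with
  | nil =>
    rw [PySem.List.index?_eq_idxOf?]
    simp [PySem.List.enumerate_nil]
  | cons y l ih =>
    rw [PySem.List.enumerate_cons, List.foldl_cons, ih]
    dsimp only
    by_cases hxy : x = y
    · subst hxy
      rw [PySem.Dict.get?_setdefault_self, PySem.List.index?_cons_self]
      cases h : d.get? x <;> simp
    · rw [PySem.Dict.get?_setdefault_of_ne d s hxy, PySem.List.index?_cons_of_ne l (Ne.symm hxy)]
      cases h : PySem.List.index? l x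
      · simp
      · simp
        congr 1
        ring
-- B's filter-over-enumerate computes dupScan
theorem b_filter_eq_dupScan (first : PySem.Dict Int Int) (flat : List Int)
    (hget : ∀ x, first.get? x = (PySem.List.index? flat x).map (fun k => (k : Int)))
    (l pre : List Int) (h : flat = pre ++ l) :
    (((PySem.List.enumerate l (pre.length : Int)).filter
        (fun p => ((first.get? p.2).map (fun j => decide (j < p.1))).getD false)).map
      (fun p => p.2)) = dupScan pre l := by
  induction l generalizing pre with
  | nil => simp [PySem.List.enumerate_nil, dupScan]
  | cons x l ih =>
    have hcond : (((first.get? x).map (fun j => decide (j < (pre.length : Int)))).getD false)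
        = decide (x ∈ pre) := by
      rw [hget, h]
      by_cases hx : x ∈ pre
      · rw [PySem.List.index?_append_of_mem _ hx]
        have hk := (PySem.List.index?_isSome_iff pre x).mpr hx
        obtain ⟨k, hk⟩ := Option.isSome_iff_exists.mp hk
        obtain ⟨p1, suf, hsp, hlen, _⟩ := (PySem.List.index?_eq_some_iff pre x k).mp hk
        have hlt : k < pre.length := by rw [hsp, ← hlen]; simp
        rw [hk]
        simp [hx]
        omega
      · have hidx : PySem.List.index? (pre ++ x :: l) x = some pre.length :=
          (PySem.List.index?_eq_some_iff _ _ _).mpr ⟨pre, l, rfl, rfl, hx⟩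
        rw [hidx]
        simp [hx]
    have hrec := ih (pre ++ [x]) (by simp [h])
    rw [List.length_append, List.length_singleton] at hrec
    push_cast at hrec
    by_cases hx : x ∈ pre <;>
      simp [PySem.List.enumerate_cons, hcond, hx, dupScan, hrec]

-- A's loop body, fed with seen = ofList pre, accumulates dupScan into the duplicates set
theorem a_foldl_eq (l : List Int) (pre : List Int) (d : PySem.Set Int) :
    (l.foldl
        (fun (acc : PySem.Set Int × PySem.Set Int) x =>
          if x ∉ acc.1 then (acc.1.add x, acc.2) else (acc.1, acc.2.add x))
        (PySem.Set.ofList pre, d)).2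
      = (dupScan pre l).foldl PySem.Set.add d := by
  induction l generalizing pre d with
  | nil => simp [dupScan]
  | cons x l ih =>
    have hofl : PySem.Set.ofList (pre ++ [x]) = PySem.Set.add (PySem.Set.ofList pre) x := by
      simp [PySem.Set.ofList, List.foldl_append]
    by_cases hx : x ∈ pre
    · have hmem : x ∈ PySem.Set.ofList pre := by
        simpa [PySem.Set.mem_ofList] using hx
      have hadd : PySem.Set.add (PySem.Set.ofList pre) x = PySem.Set.ofList pre := by
        simp [PySem.Set.add, hmem]
      have := ih (pre ++ [x]) (d.add x)
      rw [hofl, hadd] at this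
      simpa [List.foldl_cons, hmem, dupScan, hx] using this
    · have hmem : x ∉ PySem.Set.ofList pre := by
        simpa [PySem.Set.mem_ofList] using hx
      have := ih (pre ++ [x]) d
      rw [hofl] at this
      simpa [List.foldl_cons, hmem, dupScan, hx, PySem.Set.add] using this

-- ===== VERDICT (by name: the statement is the Claim_ definition above) =====
theorem pairwise_and_spec : Claim_equal_pairwise_and := by
  intro sets _
  unfold Spec_pairwise_and pairwise_and pairwise_and_alt
  dsimp only
  have hget : ∀ x, ((PySem.List.enumerate (sets.flatMap (fun s => s))).foldl
      (fun (d : PySem.Dict Int Int) p => d.setdefault p.2 p.1) PySem.Dict.empty).get? x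
      = (PySem.List.index? (sets.flatMap (fun s => s)) x).map (fun k => (k : Int)) := by
    intro x
    rw [get?_setdefault_fold]
    simp [PySem.Dict.get?_empty]
  have hb := b_filter_eq_dupScan _ (sets.flatMap (fun s => s)) hget
    (sets.flatMap (fun s => s)) [] (by simp)
  have ha := a_foldl_eq (sets.flatMap (fun s => s)) [] PySem.Set.empty
  simp only [List.length_nil, Nat.cast_zero] at hb
  rw [show PySem.Set.ofList (α := Int) [] = PySem.Set.empty from rfl,
    List.flatMap_id', List.foldl_flatten] at ha
  rw [List.flatMap_id'] at hb
  rw [List.flatMap_id', hb]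
  exact ha
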